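-- pv_equiv track=rewrite | github.com/BMRETURN/OmniVCHall | vcd_ste/core.py | subset_by_type
-- ===== SOURCE A (Python) =====
-- from typing import Dict, List, Optional
--
-- QUESTION_TYPES = ("s_ynqa", "m_ynqa", "s_mcqa", "m_mcqa")
--
-- def parse_qa_item(item):
--     if "s_ynqa_id" in item:
--         return "s_ynqa", int(item["s_ynqa_id"]), item["yn_question"], item["yn_answer"], None
--     if "m_ynqa_id" in item:
--         return "m_ynqa", int(item["m_ynqa_id"]), item["yn_question"], item["yn_answer"], None
--     if "s_mcqa_id" in item:
--         return "s_mcqa", int(item["s_mcqa_id"]), item["mc_question"], item["mc_answer"], item.get("mc_option")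
--     if "m_mcqa_id" in item:
--         return "m_mcqa", int(item["m_mcqa_id"]), item["mc_question"], item["mc_answer"], item.get("mc_option")
--     return None
--
-- def subset_by_type(data: List[dict], per_type: int):
--     if per_type <= 0:
--         return data
--     buckets = {k: [] for k in QUESTION_TYPES}
--     for item in data:
--         parsed = parse_qa_item(item)
--         if parsed is None:
--             continue
--         q_type = parsed[0]
--         if len(buckets[q_type]) < per_type:
--             buckets[q_type].append(item)
--     out = []
--     for q in QUESTION_TYPES:
--         out.extend(buckets[q])
--     return out
-- ===== SOURCE B (Python) =====
-- QUESTION_TYPES = ("s_ynqa", "m_ynqa", "s_mcqa", "m_mcqa")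
--
-- def parse_qa_item(item):
--     if "s_ynqa_id" in item:
--         return "s_ynqa", int(item["s_ynqa_id"]), item["yn_question"], item["yn_answer"], None
--     if "m_ynqa_id" in item:
--         return "m_ynqa", int(item["m_ynqa_id"]), item["yn_question"], item["yn_answer"], None
--     if "s_mcqa_id" in item:
--         return "s_mcqa", int(item["s_mcqa_id"]), item["mc_question"], item["mc_answer"], item.get("mc_option")
--     if "m_mcqa_id" in item:
--         return "m_mcqa", int(item["m_mcqa_id"]), item["mc_question"], item["mc_answer"], item.get("mc_option")
--     return None
--
-- def subset_by_type(data, per_type):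
--     if per_type <= 0:
--         return data
--     out = []
--     for q in QUESTION_TYPES:
--         picked = []
--         for item in data:
--             if len(picked) >= per_type:
--                 break
--             parsed = parse_qa_item(item)
--             if parsed is not None and parsed[0] == q:
--                 picked.append(item)
--         out.extend(picked)
--     return out
-- ===== Notes on version B (the rewrite author's own statement) =====
-- stated objective: alternative
-- what changed: Replaces A's single bucketing pass into a per-type dict (then concatenating buckets) by one filtering scan per question type that takes the first per_type matching items, concatenated in type order.
import Mathlib
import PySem

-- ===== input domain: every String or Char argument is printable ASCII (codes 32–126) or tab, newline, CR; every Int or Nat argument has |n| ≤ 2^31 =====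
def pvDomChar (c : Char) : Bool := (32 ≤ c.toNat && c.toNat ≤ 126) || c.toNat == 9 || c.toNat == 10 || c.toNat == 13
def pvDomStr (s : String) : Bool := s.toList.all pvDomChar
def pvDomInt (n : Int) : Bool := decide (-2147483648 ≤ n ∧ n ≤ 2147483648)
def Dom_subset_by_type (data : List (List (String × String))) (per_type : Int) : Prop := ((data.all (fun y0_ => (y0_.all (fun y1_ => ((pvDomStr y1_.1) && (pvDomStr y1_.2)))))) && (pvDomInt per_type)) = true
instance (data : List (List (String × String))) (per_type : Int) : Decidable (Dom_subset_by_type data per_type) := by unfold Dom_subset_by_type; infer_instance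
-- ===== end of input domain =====

-- B replaces A's single bucketing pass into a per-type dict by one filtering scan
-- per question type (first per_type matches each, concatenated in type order):
-- alternative decomposition, same result.

-- ===== PORT A =====
def QUESTION_TYPES : List String := ["s_ynqa", "m_ynqa", "s_mcqa", "m_mcqa"]

-- dict first-match lookup (item.get / 'in' / item[k] share it)
def dget? (item : List (String × String)) (k : String) : Option String :=
  (item.find? (fun p => p.1 == k)).map (·.2)

-- parse_qa_item; where Python raises (int() ValueError, missing question/answer key
-- → KeyError) the port returns none — those inputs are excluded by Pre_.
def parse_qa_item (item : List (String × String)) :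
    Option (String × Int × String × String × Option String) :=
  match dget? item "s_ynqa_id" with
  | some sid =>
    match PySem.Int.ofStr? sid, dget? item "yn_question", dget? item "yn_answer" with
    | some n, some q, some a => some ("s_ynqa", n, q, a, none)
    | _, _, _ => none
  | none =>
  match dget? item "m_ynqa_id" with
  | some sid =>
    match PySem.Int.ofStr? sid, dget? item "yn_question", dget? item "yn_answer" with
    | some n, some q, some a => some ("m_ynqa", n, q, a, none)
    | _, _, _ => none
  | none =>
  match dget? item "s_mcqa_id" with
  | some sid =>
    match PySem.Int.ofStr? sid, dget? item "mc_question", dget? item "mc_answer" with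
    | some n, some q, some a => some ("s_mcqa", n, q, a, dget? item "mc_option")
    | _, _, _ => none
  | none =>
  match dget? item "m_mcqa_id" with
  | some sid =>
    match PySem.Int.ofStr? sid, dget? item "mc_question", dget? item "mc_answer" with
    | some n, some q, some a => some ("m_mcqa", n, q, a, dget? item "mc_option")
    | _, _, _ => none
  | none => none

-- the body of A's bucketing loop
def stepA (per_type : Int)
    (b : PySem.Dict String (List (List (String × String))))
    (item : List (String × String)) :
    PySem.Dict String (List (List (String × String))) :=
  match parse_qa_item item with
  | none => b
  | some parsed =>
    if ((b.getD parsed.1 []).length : Int) < per_type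
    then b.insert parsed.1 (b.getD parsed.1 [] ++ [item])
    else b

def subset_by_type (data : List (List (String × String))) (per_type : Int) :
    List (List (String × String)) :=
  if per_type ≤ 0 then data
  else
    let buckets0 : PySem.Dict String (List (List (String × String))) :=
      QUESTION_TYPES.foldl (fun d k => d.insert k []) PySem.Dict.empty
    let buckets := data.foldl (stepA per_type) buckets0
    QUESTION_TYPES.foldl (fun out q => out ++ buckets.getD q []) []

-- ===== PORT B =====
-- inner loop of B: first per_type items of type q, in order (cnt = len(picked))
def pick (q : String) (per_type : Int) :
    List (List (String × String)) → Nat → List (List (String × String))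
  | [], _ => []
  | item :: rest, cnt =>
    if per_type ≤ (cnt : Int) then []      -- break
    else
      match parse_qa_item item with
      | some p => if p.1 = q then item :: pick q per_type rest (cnt + 1)
                  else pick q per_type rest cnt
      | none => pick q per_type rest cnt

def subset_by_type_alt (data : List (List (String × String))) (per_type : Int) :
    List (List (String × String)) :=
  if per_type ≤ 0 then data
  else QUESTION_TYPES.foldl (fun out q => out ++ pick q per_type data 0) []

-- ===== PRECONDITION & SPEC =====
-- a dict item on which parse_qa_item returns without raising (int() succeeds and
-- the question/answer keys are present in the branch taken)
def itemOK (item : List (String × String)) : Bool :=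
  match dget? item "s_ynqa_id" with
  | some sid => (PySem.Int.ofStr? sid).isSome && (dget? item "yn_question").isSome && (dget? item "yn_answer").isSome
  | none =>
  match dget? item "m_ynqa_id" with
  | some sid => (PySem.Int.ofStr? sid).isSome && (dget? item "yn_question").isSome && (dget? item "yn_answer").isSome
  | none =>
  match dget? item "s_mcqa_id" with
  | some sid => (PySem.Int.ofStr? sid).isSome && (dget? item "mc_question").isSome && (dget? item "mc_answer").isSome
  | none =>
  match dget? item "m_mcqa_id" with
  | some sid => (PySem.Int.ofStr? sid).isSome && (dget? item "mc_question").isSome && (dget? item "mc_answer").isSome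
  | none => true

-- Pre_ excludes exactly the inputs on which A raises (ValueError from int() on a
-- non-integer id, or KeyError on a missing question/answer key), reached when per_type > 0.
def Pre_subset_by_type (data : List (List (String × String))) (per_type : Int) : Prop :=
  per_type ≤ 0 ∨ ∀ item ∈ data, itemOK item = true

instance (data : List (List (String × String))) (per_type : Int) : Decidable (Pre_subset_by_type data per_type) := by unfold Pre_subset_by_type; infer_instance

def pvWitness_subset_by_type : (List (List (String × String))) × Int :=
  ([[("s_ynqa_id", "1"), ("yn_question", "q?"), ("yn_answer", "yes")],
    [("junk", "x")]], 1)

def Spec_subset_by_type (data : List (List (String × String))) (per_type : Int) (out : List (List (String × String))) : Prop := out = subset_by_type_alt data per_type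
instance (data : List (List (String × String))) (per_type : Int) (out : List (List (String × String))) : Decidable (Spec_subset_by_type data per_type out) := by unfold Spec_subset_by_type; infer_instance

-- ===== CLAIM (what is proved, stated in full; the proofs are below) =====
def Claim_equal_subset_by_type : Prop := ∀ (data : List (List (String × String))) (per_type : Int), Dom_subset_by_type data per_type → Pre_subset_by_type data per_type → Spec_subset_by_type data per_type (subset_by_type data per_type)

-- ===== LEMMAS AND PROOFS =====

-- A's bucket for key q, tracked as a list accumulator
def aux (q : String) (pt : Int) :
    List (List (String × String)) → List (List (String × String)) → List (List (String × String))
  | [], acc => acc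
  | item :: rest, acc =>
    match parse_qa_item item with
    | none => aux q pt rest acc
    | some p =>
      if p.1 = q then
        (if (acc.length : Int) < pt then aux q pt rest (acc ++ [item]) else aux q pt rest acc)
      else aux q pt rest acc

theorem loop_getD (pt : Int) (q : String) :
    ∀ (data : List (List (String × String))) (b : PySem.Dict String (List (List (String × String)))),
      (data.foldl (stepA pt) b).getD q [] = aux q pt data (b.getD q [])
  | [], _ => rfl
  | item :: rest, b => by
    rw [List.foldl_cons]
    cases hp : parse_qa_item item with
    | none =>
      rw [loop_getD pt q rest]
      simp [stepA, hp, aux]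
    | some p =>
      by_cases hq : p.1 = q
      · by_cases hlt : ((b.getD q []).length : Int) < pt
        · rw [loop_getD pt q rest]
          simp [stepA, hp, hq, hlt, aux, PySem.Dict.getD_insert_self]
        · rw [loop_getD pt q rest]
          simp [stepA, hp, hq, hlt, aux]
      · rw [loop_getD pt q rest]
        simp only [stepA, hp, aux, hq, if_false]
        split
        · rw [PySem.Dict.getD_insert, if_neg (fun h => hq h.symm)]
        · rfl

theorem pick_stop (q : String) (pt : Int) (data : List (List (String × String))) (cnt : Nat)
    (h : pt ≤ (cnt : Int)) : pick q pt data cnt = [] := by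
  cases data <;> simp [pick, h]

theorem aux_full (q : String) (pt : Int) :
    ∀ (data acc : List (List (String × String))), pt ≤ (acc.length : Int) →
      aux q pt data acc = acc
  | [], _, _ => rfl
  | item :: rest, acc, h => by
    cases hp : parse_qa_item item with
    | none => simpa [aux, hp] using aux_full q pt rest acc h
    | some p =>
      by_cases hq : p.1 = q
      · have : ¬ ((acc.length : Int) < pt) := by omega
        simpa [aux, hp, hq, this] using aux_full q pt rest acc h
      · simpa [aux, hp, hq] using aux_full q pt rest acc h

theorem aux_pick (q : String) (pt : Int) :
    ∀ (data acc : List (List (String × String))),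
      aux q pt data acc = acc ++ pick q pt data acc.length
  | [], acc => by simp [aux, pick]
  | item :: rest, acc => by
    by_cases hfull : pt ≤ (acc.length : Int)
    · rw [aux_full q pt (item :: rest) acc hfull, pick_stop q pt _ _ hfull]
      simp
    · cases hp : parse_qa_item item with
      | none =>
        rw [show aux q pt (item :: rest) acc = aux q pt rest acc by simp [aux, hp]]
        rw [aux_pick q pt rest acc]
        simp [pick, hfull, hp]
      | some p =>
        by_cases hq : p.1 = q
        · have hlt : (acc.length : Int) < pt := by omega
          rw [show aux q pt (item :: rest) acc = aux q pt rest (acc ++ [item]) by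
            simp [aux, hp, hq, hlt]]
          rw [aux_pick q pt rest (acc ++ [item])]
          simp [pick, hfull, hp, hq]
        · rw [show aux q pt (item :: rest) acc = aux q pt rest acc by simp [aux, hp, hq]]
          rw [aux_pick q pt rest acc]
          simp [pick, hfull, hp, hq]

theorem bucket_eq_pick (pt : Int) (data : List (List (String × String))) (q : String)
    (h0 : ((QUESTION_TYPES.foldl (fun d k => d.insert k []) PySem.Dict.empty).getD q
            ([] : List (List (String × String)))) = []) :
    (data.foldl (stepA pt) (QUESTION_TYPES.foldl (fun d k => d.insert k []) PySem.Dict.empty)).getD q []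
      = pick q pt data 0 := by
  rw [loop_getD, h0, aux_pick]
  simp

-- ===== VERDICT (by name: the statement is the Claim_ definition above) =====
theorem subset_by_type_spec : Claim_equal_subset_by_type := by
  intro data per_type _ _
  unfold Spec_subset_by_type subset_by_type subset_by_type_alt
  by_cases h : per_type ≤ 0
  · simp [h]
  · simp only [h, if_false]
    have h1 := bucket_eq_pick per_type data "s_ynqa" (by decide)
    have h2 := bucket_eq_pick per_type data "m_ynqa" (by decide)
    have h3 := bucket_eq_pick per_type data "s_mcqa" (by decide)
    have h4 := bucket_eq_pick per_type data "m_mcqa" (by decide)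
    simp only [QUESTION_TYPES, List.foldl] at h1 h2 h3 h4 ⊢
    rw [h1, h2, h3, h4]
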